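-- pv_equiv track=rewrite | github.com/semh59/agent-stack | core/bridge/cleaning/cli_cleaner.py | _clean_git_diff
-- ===== SOURCE A (Python) =====
-- def _clean_git_diff(lines: list[str]) -> list[str]:
--     """Max 200 lines. Limit unchanged context lines to 3 per hunk."""
--     out: list[str] = []
--     ctx_count = 0
--     for i, line in enumerate(lines):
--         if i >= 200:
--             break
--         ch = line[0] if line else " "
--         if ch in ("+", "-", "@", "d", "i", "n"):  # diff, index, new file
--             ctx_count = 0
--             out.append(line)
--         elif ch == " ":  # context line
--             ctx_count += 1
--             if ctx_count <= 3:
--                 out.append(line)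
--         else:
--             ctx_count = 0
--             out.append(line)
--     if len(lines) > 200:
--         out.append(f"... [{len(lines) - 200} more lines truncated]")
--     return out
-- ===== SOURCE B (Python) =====
-- def _clean_git_diff(lines: list[str]) -> list[str]:
--     """Max 200 lines. Limit unchanged context lines to 3 per hunk."""
--     head = lines[:200]
--     out: list[str] = []
--     n = len(head)
--     i = 0
--     while i < n:
--         is_ctx = (not head[i]) or head[i][0] == " "
--         j = i
--         while j < n and (((not head[j]) or head[j][0] == " ") == is_ctx):
--             j += 1
--         run = head[i:j]
--         out.extend(run[:3] if is_ctx else run)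
--         i = j
--     if len(lines) > 200:
--         out.append(f"... [{len(lines) - 200} more lines truncated]")
--     return out
-- ===== Notes on version B (the rewrite author's own statement) =====
-- stated objective: alternative
-- what changed: Replaces the per-line running ctx_count counter with explicit run grouping: split lines[:200] into maximal runs of context vs non-context lines and emit run[:3] for context runs, the whole run otherwise.
import Mathlib
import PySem

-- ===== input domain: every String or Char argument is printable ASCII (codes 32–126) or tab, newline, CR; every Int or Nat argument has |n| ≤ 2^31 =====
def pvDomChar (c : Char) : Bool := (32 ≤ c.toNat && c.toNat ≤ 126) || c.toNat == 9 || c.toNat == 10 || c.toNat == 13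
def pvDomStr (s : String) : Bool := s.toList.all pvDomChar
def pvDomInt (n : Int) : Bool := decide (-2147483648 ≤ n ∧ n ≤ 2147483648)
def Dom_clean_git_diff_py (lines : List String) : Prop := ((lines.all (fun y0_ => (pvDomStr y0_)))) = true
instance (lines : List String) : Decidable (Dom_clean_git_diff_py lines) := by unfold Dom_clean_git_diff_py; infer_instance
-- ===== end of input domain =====

-- B replaces A's running context counter by explicit run grouping over lines[:200]
-- (maximal context/non-context runs, context runs truncated to their first 3 lines); alternative decomposition, same cost.


-- ===== PORT A =====
-- ch = line[0] if line else " "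
def pvFirstCh (l : String) : Char :=
  match l.toList with
  | [] => ' '
  | c :: _ => c

-- ch in ("+", "-", "@", "d", "i", "n")
def pvIsDiffCh (c : Char) : Bool :=
  c == '+' || c == '-' || c == '@' || c == 'd' || c == 'i' || c == 'n'

-- the for-loop of A: index i (break at 200) and running ctx_count
def pvAGo : List String → Int → Int → List String
  | [], _, _ => []
  | l :: ls, i, ctx =>
    if i ≥ 200 then []
    else
      let ch := pvFirstCh l
      if pvIsDiffCh ch then l :: pvAGo ls (i + 1) 0
      else if ch == ' ' then
        if ctx + 1 ≤ 3 then l :: pvAGo ls (i + 1) (ctx + 1)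
        else pvAGo ls (i + 1) (ctx + 1)
      else l :: pvAGo ls (i + 1) 0

def clean_git_diff_py (lines : List String) : List String :=
  pvAGo lines 0 0 ++
    (if (lines.length : Int) > 200 then
      ["... [" ++ PySem.Int.toStr ((lines.length : Int) - 200) ++ " more lines truncated]"]
    else [])

-- ===== PORT B =====
-- is_ctx = (not head[i]) or head[i][0] == " "
def pvIsCtx (l : String) : Bool :=
  match l.toList with
  | [] => true
  | c :: _ => c == ' '

-- B's outer while loop: peel off one maximal run (inner while = takeWhile/dropWhile) per step
def pvBGo : List String → List String
  | [] => []
  | l :: ls =>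
    let k := pvIsCtx l
    let run := List.takeWhile (fun x => pvIsCtx x == k) (l :: ls)
    let rest := List.dropWhile (fun x => pvIsCtx x == k) (l :: ls)
    (if k then run.take 3 else run) ++ pvBGo rest
  termination_by ls => ls.length
  decreasing_by
    simp only [List.dropWhile_cons, beq_self_eq_true, if_true, List.length_cons]
    exact Nat.lt_succ_of_le (List.length_dropWhile_le _ _)

def clean_git_diff_py_alt (lines : List String) : List String :=
  pvBGo (lines.take 200) ++
    (if (lines.length : Int) > 200 then
      ["... [" ++ PySem.Int.toStr ((lines.length : Int) - 200) ++ " more lines truncated]"]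
    else [])

-- ===== PRECONDITION & SPEC =====
def Spec_clean_git_diff_py (lines : List String) (out : List String) : Prop := out = clean_git_diff_py_alt lines
instance (lines : List String) (out : List String) : Decidable (Spec_clean_git_diff_py lines out) := by unfold Spec_clean_git_diff_py; infer_instance

-- ===== CLAIM (what is proved, stated in full; the proofs are below) =====
def Claim_equal_clean_git_diff_py : Prop := ∀ (lines : List String), Dom_clean_git_diff_py lines → Spec_clean_git_diff_py lines (clean_git_diff_py lines)

-- ===== LEMMAS AND PROOFS =====

-- index-free version of A's loop (proof helper)
def pvALoop : List String → Int → List String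
  | [], _ => []
  | l :: ls, ctx =>
    let ch := pvFirstCh l
    if pvIsDiffCh ch then l :: pvALoop ls 0
    else if ch == ' ' then
      if ctx + 1 ≤ 3 then l :: pvALoop ls (ctx + 1)
      else pvALoop ls (ctx + 1)
    else l :: pvALoop ls 0

lemma pvIsCtx_iff (l : String) : pvIsCtx l = true ↔ pvFirstCh l = ' ' := by
  unfold pvIsCtx pvFirstCh
  cases l.toList with
  | nil => simp
  | cons c cs => simp

-- the index+break loop equals the index-free loop on the 200-prefix
lemma pvAGo_take : ∀ (ls : List String) (n : Nat) (ctx : Int), n ≤ 200 →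
    pvAGo ls (200 - (n : Int)) ctx = pvALoop (ls.take n) ctx := by
  intro ls
  induction ls with
  | nil => intro n ctx _; cases n <;> simp [pvAGo, pvALoop]
  | cons l ls ih =>
    intro n ctx hn
    cases n with
    | zero =>
      simp only [List.take_zero, pvALoop]
      simp [pvAGo]
    | succ m =>
      have hm : m ≤ 200 := Nat.le_of_succ_le hn
      have hlt : ¬ ((200 : Int) - ((m + 1 : Nat) : Int) ≥ 200) := by push_cast; omega
      have hstep : (200 : Int) - ((m + 1 : Nat) : Int) + 1 = 200 - (m : Int) := by push_cast; omega
      simp only [pvAGo, hlt, if_false, hstep, ih m 0 hm, ih m (ctx + 1) hm,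
        List.take_succ_cons, pvALoop]

-- non-context lines ignore and reset the counter
lemma pvALoop_nonctx_head (r : String) (rs : List String) (c c' : Int)
    (hr : pvIsCtx r = false) : pvALoop (r :: rs) c = pvALoop (r :: rs) c' := by
  have hch : pvFirstCh r ≠ ' ' := by
    intro h; rw [← pvIsCtx_iff] at h; simp [h] at hr
  simp only [pvALoop]
  by_cases hd : pvIsDiffCh (pvFirstCh r) = true
  · simp [hd]
  · simp [hd, hch]

-- a run of non-context lines is emitted wholesale, counter reset
lemma pvALoop_nonctx_run : ∀ (run rest : List String) (c : Int), run ≠ [] →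
    (∀ x ∈ run, pvIsCtx x = false) →
    pvALoop (run ++ rest) c = run ++ pvALoop rest 0 := by
  intro run
  induction run with
  | nil => intro rest c h _; exact absurd rfl h
  | cons r rs ih =>
    intro rest c _ hall
    have hr : pvIsCtx r = false := hall r (List.mem_cons_self)
    have hch : pvFirstCh r ≠ ' ' := by
      intro h; rw [← pvIsCtx_iff] at h; simp [h] at hr
    have hbody : pvALoop ((r :: rs) ++ rest) c = r :: pvALoop (rs ++ rest) 0 := by
      simp only [List.cons_append, pvALoop]
      by_cases hd : pvIsDiffCh (pvFirstCh r) = true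
      · simp [hd]
      · simp [hd, hch]
    rw [hbody]
    cases rs with
    | nil => simp
    | cons r' rs' =>
      rw [ih rest 0 (by simp) (fun x hx => hall x (List.mem_cons_of_mem _ hx))]
      simp

-- a run of context lines contributes its first (3 - c) lines
lemma pvALoop_ctx_run : ∀ (run rest : List String) (c : Int), 0 ≤ c →
    (∀ x ∈ run, pvIsCtx x = true) →
    pvALoop (run ++ rest) c = run.take (3 - c).toNat ++ pvALoop rest (c + run.length) := by
  intro run
  induction run with
  | nil => intro rest c _ _; simp
  | cons r rs ih =>
    intro rest c hc hall
    have hr : pvFirstCh r = ' ' := (pvIsCtx_iff r).mp (hall r List.mem_cons_self)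
    have hnd : pvIsDiffCh (pvFirstCh r) = false := by rw [hr]; decide
    have hrec := ih rest (c + 1) (by omega) (fun x hx => hall x (List.mem_cons_of_mem _ hx))
    have hlen : c + 1 + (rs.length : Int) = c + ((r :: rs).length : Int) := by
      simp; omega
    have hnd' : pvIsDiffCh ' ' = false := by decide
    simp only [List.cons_append, pvALoop, hr, hnd', Bool.false_eq_true, if_false,
      beq_self_eq_true, if_true]
    by_cases h3 : c + 1 ≤ 3
    · have htk : (3 - c).toNat = (3 - (c + 1)).toNat + 1 := by omega
      simp only [if_pos h3, hrec, htk, List.take_succ_cons, List.cons_append, hlen]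
    · have htk : (3 - c).toNat = 0 := by omega
      have htk2 : (3 - (c + 1)).toNat = 0 := by omega
      simp only [if_neg h3, hrec, htk, htk2, List.take_zero, List.nil_append, hlen]

-- the index-free loop with counter 0 equals B's run-grouping loop
lemma pvALoop_eq_pvBGo : ∀ (n : Nat) (ls : List String), ls.length ≤ n →
    pvALoop ls 0 = pvBGo ls := by
  intro n
  induction n with
  | zero => intro ls h; rw [List.length_eq_zero_iff.mp (Nat.le_zero.mp h)]; simp [pvALoop, pvBGo]
  | succ m ih =>
    intro ls hlen
    cases ls with
    | nil => simp [pvALoop, pvBGo]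
    | cons l ls =>
      set p : String → Bool := fun x => pvIsCtx x == pvIsCtx l with hp
      have hsplit : List.takeWhile p (l :: ls) ++ List.dropWhile p (l :: ls) = l :: ls :=
        List.takeWhile_append_dropWhile
      have hrestlen : (List.dropWhile p (l :: ls)).length ≤ m := by
        have h1 : List.dropWhile p (l :: ls) = List.dropWhile p ls := by
          simp [hp]
        rw [h1]
        have := List.length_dropWhile_le p ls
        simp only [List.length_cons] at hlen
        omega
      have hBrest := ih _ hrestlen
      have hmem : ∀ x ∈ List.takeWhile p (l :: ls), pvIsCtx x = pvIsCtx l := by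
        intro x hx
        have := List.mem_takeWhile_imp hx
        simpa [hp] using this
      have hrun_ne : List.takeWhile p (l :: ls) ≠ [] := by
        simp [hp]
      have hBdef : pvBGo (l :: ls) =
          (if pvIsCtx l then (List.takeWhile p (l :: ls)).take 3 else List.takeWhile p (l :: ls))
            ++ pvBGo (List.dropWhile p (l :: ls)) := by
        rw [pvBGo]
      rcases hk : pvIsCtx l with _ | _
  -- non-context run: emitted wholesale
      · have hall : ∀ x ∈ List.takeWhile p (l :: ls), pvIsCtx x = false := by
          intro x hx; rw [hmem x hx, hk]
        calc pvALoop (l :: ls) 0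
            = pvALoop (List.takeWhile p (l :: ls) ++ List.dropWhile p (l :: ls)) 0 := by
              rw [hsplit]
          _ = List.takeWhile p (l :: ls) ++ pvALoop (List.dropWhile p (l :: ls)) 0 :=
              pvALoop_nonctx_run _ _ 0 hrun_ne hall
          _ = List.takeWhile p (l :: ls) ++ pvBGo (List.dropWhile p (l :: ls)) := by
              rw [hBrest]
          _ = pvBGo (l :: ls) := by rw [hBdef, hk]; simp
  -- context run: first 3 lines, rest starts non-context (or is empty)
      · have hall : ∀ x ∈ List.takeWhile p (l :: ls), pvIsCtx x = true := by
          intro x hx; rw [hmem x hx, hk]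
        have hctx := pvALoop_ctx_run (List.takeWhile p (l :: ls))
          (List.dropWhile p (l :: ls)) 0 le_rfl hall
        have hrest0 : pvALoop (List.dropWhile p (l :: ls))
            (0 + ((List.takeWhile p (l :: ls)).length : Int))
            = pvALoop (List.dropWhile p (l :: ls)) 0 := by
          cases hE : List.dropWhile p (l :: ls) with
          | nil => rfl
          | cons r rs =>
            have hrF : pvIsCtx r = false := by
              have hh := List.head?_dropWhile_not p (l :: ls)
              rw [hE] at hh
              simp only [hp, hk] at hh
              simpa using hh
            exact pvALoop_nonctx_head r rs _ 0 hrF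
        calc pvALoop (l :: ls) 0
            = pvALoop (List.takeWhile p (l :: ls) ++ List.dropWhile p (l :: ls)) 0 := by
              rw [hsplit]
          _ = (List.takeWhile p (l :: ls)).take 3 ++ pvBGo (List.dropWhile p (l :: ls)) := by
              rw [hctx, hrest0, hBrest]; simp
          _ = pvBGo (l :: ls) := by rw [hBdef, hk]; simp

-- ===== VERDICT (by name: the statement is the Claim_ definition above) =====
theorem clean_git_diff_py_spec : Claim_equal_clean_git_diff_py := by
  intro lines _
  unfold Spec_clean_git_diff_py clean_git_diff_py clean_git_diff_py_alt
  have h := pvAGo_take lines 200 0 le_rfl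
  norm_num at h
  rw [h, pvALoop_eq_pvBGo (lines.take 200).length (lines.take 200) le_rfl]
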